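-- pv_equiv track=rewrite | github.com/xu1718191411/AT_CODE_BEGINNER_SELECTION | CONTEXT_134/preparing_boxes.py | calculate
-- ===== SOURCE A (Python) =====
-- def calculate(arr):
--     N = len(arr)
--     index = N - 1
--
--     result = [0]*N
--     result2 = []
--
--     while index >= 0:
--
--         if N // (index+1) > 1:
--             v1 = calculate2(N // (index+1),index,result)
--
--             if arr[index] % 2 == 0:
--                 if v1 % 2 == 0:
--                     pass
--                 else:
--                     result[index] = 1
--                     result2.append(index + 1)
--             else:
--                 if v1 % 2 == 0:
--                     result[index] = 1
--                     result2.append(index + 1)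
--                 else:
--                     pass
--
--         else:
--             if arr[index] == 0:
--                 result[index] = 0
--             else:
--                 result[index] = 1
--                 result2.append(index + 1)
--
--         index = index - 1
--
--     return result,result2
--
-- def calculate2(len, base, arr):
--     result = 0
--     for i in range(2, len+1):
--         result += arr[(base + 1) * i - 1]
--     return result
-- ===== SOURCE B (Python) =====
-- def calculate(arr):
--     N = len(arr)
--     result = [0] * N
--     par = [0] * N
--     result2 = []
--     for j in range(N - 1, -1, -1):
--         m = j + 1
--         if N // m > 1:
--             r = (arr[j] + par[j]) % 2
--         else:
--             r = 0 if arr[j] == 0 else 1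
--         result[j] = r
--         if r == 1:
--             result2.append(m)
--             s = int(m ** 0.5)
--             while (s + 1) * (s + 1) <= m:
--                 s += 1
--             while s * s > m:
--                 s -= 1
--             for d in range(1, s + 1):
--                 if m % d == 0:
--                     if 2 * d <= m:
--                         par[d - 1] += 1
--                     q = m // d
--                     if q != d and 2 * q <= m:
--                         par[q - 1] += 1
--     return result, result2
-- ===== Notes on version B (the rewrite author's own statement) =====
-- stated objective: alternative
-- what changed: Replaces A's per-index rescan of all multiples (calculate2) with a single descending pass that pushes each decided 1-entry's parity into an accumulator at the proper divisors of its 1-based index, enumerated in sqrt(m) pairs.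
import Mathlib
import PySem

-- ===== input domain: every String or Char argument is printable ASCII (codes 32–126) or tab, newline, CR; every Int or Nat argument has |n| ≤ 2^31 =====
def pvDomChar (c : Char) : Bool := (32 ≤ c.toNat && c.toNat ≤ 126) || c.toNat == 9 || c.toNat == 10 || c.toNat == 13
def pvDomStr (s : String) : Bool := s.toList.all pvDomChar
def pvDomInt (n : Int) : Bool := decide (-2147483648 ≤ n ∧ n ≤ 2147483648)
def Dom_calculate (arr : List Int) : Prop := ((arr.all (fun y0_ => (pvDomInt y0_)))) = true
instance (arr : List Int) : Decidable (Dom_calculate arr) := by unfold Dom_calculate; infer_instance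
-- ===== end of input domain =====

-- B replaces A's per-index re-scan of multiples (calculate2) by a parity accumulator pushed to the
-- proper divisors of each decided index (objective: alternative decomposition; not claimed faster).

-- ===== PORT A =====
-- A's helper calculate2; at A's call sites the indexed positions (base+1)*i-1 are always in range,
-- so pyGetD models Python's arr[...] exactly there.
def calculate2 (len : Int) (base : Int) (arr : List Int) : Int :=
  (PySem.List.pyRange 2 (len + 1) 1).foldl
    (fun result i => result + PySem.List.pyGetD arr ((base + 1) * i - 1) 0) 0

-- A's while loop, counting down; fuel k+1 processes index k.
def calcA_loop (arr : List Int) (N : Int) : Nat → List Int → List Int → List Int × List Int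
  | 0, result, result2 => (result, result2)
  | k + 1, result, result2 =>
    let index : Int := (k : Nat)
    if PySem.Int.floordiv N (index + 1) > 1 then
      let v1 := calculate2 (PySem.Int.floordiv N (index + 1)) index result
      if PySem.Int.mod (PySem.List.pyGetD arr index 0) 2 = 0 then
        if PySem.Int.mod v1 2 = 0 then
          calcA_loop arr N k result result2
        else
          calcA_loop arr N k (PySem.List.pySetD result index 1) (result2 ++ [index + 1])
      else
        if PySem.Int.mod v1 2 = 0 then
          calcA_loop arr N k (PySem.List.pySetD result index 1) (result2 ++ [index + 1])
        else
          calcA_loop arr N k result result2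
    else
      if PySem.List.pyGetD arr index 0 = 0 then
        calcA_loop arr N k (PySem.List.pySetD result index 0) result2
      else
        calcA_loop arr N k (PySem.List.pySetD result index 1) (result2 ++ [index + 1])

def calculate (arr : List Int) : List Int × List Int :=
  calcA_loop arr (arr.length : Int) arr.length (List.replicate arr.length 0) []

-- ===== PORT B =====
-- Source B's divisor push for index j (m = j+1): s = isqrt(m) — int(m**0.5) followed by the two
-- correction loops yields EXACTLY the integer square root whatever the float seed was, so s is
-- ported exactly as Nat.sqrt m — then `for d in range(1, s+1)` pushes +1 into par at positions
-- d-1 and (m/d)-1 for each proper-divisor hit, exactly as the Python does.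
def pushStep (m : Nat) (p : List Int) (d : Nat) : List Int :=
  if m % d = 0 then
    let p1 := if 2 * d ≤ m then p.set (d - 1) (p.getD (d - 1) 0 + 1) else p
    if m / d ≠ d ∧ 2 * (m / d) ≤ m then p1.set (m / d - 1) (p1.getD (m / d - 1) 0 + 1) else p1
  else p

def pushFor (m : Nat) (par : List Int) : List Int :=
  (List.range' 1 (Nat.sqrt m)).foldl (pushStep m) par

-- Source B's for-loop over j = N-1 … 0; fuel k+1 processes index j = k.
def calcB_loop (arr : List Int) (N : Nat) : Nat → List Int → List Int → List Int → List Int × List Int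
  | 0, result, _, result2 => (result, result2)
  | k + 1, result, par, result2 =>
    let m := k + 1
    let r : Int :=
      if N / m > 1 then PySem.Int.mod (arr.getD k 0 + par.getD k 0) 2
      else if arr.getD k 0 = 0 then 0 else 1
    let result' := result.set k r
    if r = 1 then
      calcB_loop arr N k result' (pushFor m par) (result2 ++ [(m : Int)])
    else
      calcB_loop arr N k result' par result2

def calculate_alt (arr : List Int) : List Int × List Int :=
  calcB_loop arr arr.length arr.length (List.replicate arr.length 0) (List.replicate arr.length 0) []

-- ===== PRECONDITION & SPEC =====
def Spec_calculate (arr : List Int) (out : List Int × List Int) : Prop := out = calculate_alt arr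
instance (arr : List Int) (out : List Int × List Int) : Decidable (Spec_calculate arr out) := by unfold Spec_calculate; infer_instance

-- ===== CLAIM (what is proved, stated in full; the proofs are below) =====
def Claim_equal_calculate : Prop := ∀ (arr : List Int), Dom_calculate arr → Spec_calculate arr (calculate arr)

-- ===== LEMMAS AND PROOFS =====

-- the value A's calculate2 reads for index j, as a Nat-indexed sum over i = 2 … len/(j+1)
def sumMult (res : List Int) (j : Nat) : Int :=
  ((List.range' 2 (res.length / (j + 1) - 1)).map (fun i => res.getD ((j + 1) * i - 1) 0)).sum

theorem foldl_add_eq_sum {α : Type} (f : α → Int) (l : List α) (init : Int) :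
    l.foldl (fun r x => r + f x) init = init + (l.map f).sum := by
  induction l generalizing init with
  | nil => simp
  | cons x xs ih => simp [ih, add_assoc]

theorem sum_map_add_list (l : List Nat) (f g : Nat → Int) :
    (l.map (fun i => f i + g i)).sum = (l.map f).sum + (l.map g).sum := by
  induction l with
  | nil => simp
  | cons x xs ih => simp [ih]; ring

theorem sum_map_ite_eq (l : List Nat) (hnd : l.Nodup) (i0 : Nat) (v : Int) :
    (l.map (fun i => if i = i0 then v else 0)).sum = if i0 ∈ l then v else 0 := by
  induction l with
  | nil => simp
  | cons x xs ih =>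
    rcases List.nodup_cons.mp hnd with ⟨hx, hxs⟩
    rcases eq_or_ne x i0 with rfl | hne
    · simp [ih hxs, hx]
    · simp only [List.map_cons, List.sum_cons, if_neg hne, ih hxs, List.mem_cons]
      simp [Ne.symm hne]

theorem getD_set (xs : List Int) (k t : Nat) (v : Int) (hk : k < xs.length) :
    (xs.set k v).getD t 0 = if t = k then v else xs.getD t 0 := by
  rcases eq_or_ne t k with rfl | h
  · simp [List.getD_eq_getElem?_getD, hk]
  · simp [List.getD_eq_getElem?_getD, List.getElem?_set_ne (Ne.symm h), h]

theorem set_self_of_getD_zero (xs : List Int) (k : Nat) (hk : k < xs.length)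
    (h0 : xs.getD k 0 = 0) : xs.set k 0 = xs := by
  have hg : xs[k] = 0 := by
    rw [List.getD_eq_getElem?_getD, List.getElem?_eq_getElem hk] at h0
    simpa using h0
  calc xs.set k 0 = xs.set k xs[k] := by rw [hg]
    _ = xs := List.set_getElem_self ..

theorem calculate2_eq_sumMult (res : List Int) (k q : Nat) (hq : q = res.length / (k + 1)) :
    calculate2 ((q : Nat) : Int) ((k : Nat) : Int) res = sumMult res k := by
  unfold calculate2 sumMult
  rw [PySem.List.pyRange_one]
  have ht : ((q : Int) + 1 - 2).toNat = q - 1 := by omega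
  rw [ht, List.foldl_map, ← hq]
  rw [foldl_add_eq_sum (fun y : Nat => PySem.List.pyGetD res (((k : Int) + 1) * (2 + (y : Int)) - 1) 0)]
  rw [zero_add, List.range'_eq_map_range, List.map_map]
  apply congrArg List.sum
  apply List.map_congr_left
  intro y hy
  have hpos : 1 ≤ (k + 1) * (2 + y) := Nat.one_le_iff_ne_zero.mpr (by positivity)
  have h1 : ((k : Int) + 1) * (2 + (y : Int)) - 1 = (((k + 1) * (2 + y) - 1 : Nat) : Int) := by
    push_cast [Nat.cast_sub hpos]
    ring
  simp only [Function.comp]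
  rw [h1, PySem.List.pyGetD_natCast]

theorem sumMult_set (res : List Int) (j k : Nat) (v : Int)
    (hk : k < res.length) (h0 : res.getD k 0 = 0) (hjk : j < k) :
    sumMult (res.set k v) j
      = sumMult res j + (if (j + 1) ∣ (k + 1) ∧ 2 * (j + 1) ≤ k + 1 then v else 0) := by
  unfold sumMult
  rw [List.length_set]
  have hmap : (List.range' 2 (res.length / (j + 1) - 1)).map
        (fun i => (res.set k v).getD ((j + 1) * i - 1) 0)
      = (List.range' 2 (res.length / (j + 1) - 1)).map
        (fun i => res.getD ((j + 1) * i - 1) 0 + (if (j + 1) * i - 1 = k then v else 0)) := by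
    apply List.map_congr_left
    intro i _
    rw [getD_set _ _ _ _ hk]
    by_cases hik : (j + 1) * i - 1 = k
    · rw [if_pos hik, if_pos hik, hik, h0, zero_add]
    · rw [if_neg hik, if_neg hik, add_zero]
  rw [hmap, sum_map_add_list]
  congr 1
  have hmem : ∀ i, i ∈ List.range' 2 (res.length / (j + 1) - 1) ↔
      2 ≤ i ∧ i < 2 + (res.length / (j + 1) - 1) := by
    intro i; rw [List.mem_range'_1]
  by_cases hdvd : (j + 1) ∣ (k + 1)
  · obtain ⟨c, hc⟩ := hdvd
    have hj1 : 0 < j + 1 := by omega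
    have hptw : ∀ i ∈ List.range' 2 (res.length / (j + 1) - 1),
        (if (j + 1) * i - 1 = k then v else 0) = (if i = c then v else 0) := by
      intro i hi
      have h2i : 2 ≤ i := ((hmem i).mp hi).1
      have hprod : 1 ≤ (j + 1) * i := Nat.one_le_iff_ne_zero.mpr (by positivity)
      apply if_congr _ rfl rfl
      constructor
      · intro he
        have he' : (j + 1) * i = (j + 1) * c := by omega
        exact Nat.eq_of_mul_eq_mul_left hj1 he'
      · rintro rfl
        omega
    rw [List.map_congr_left hptw, sum_map_ite_eq _ List.nodup_range' c v]
    have hcq : c ≤ res.length / (j + 1) := by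
      have h1 : c = (k + 1) / (j + 1) := by
        rw [hc]; exact (Nat.mul_div_cancel_left c hj1).symm
      rw [h1]
      exact Nat.div_le_div_right (by omega)
    by_cases h2 : 2 * (j + 1) ≤ k + 1
    · have hc2 : 2 ≤ c := by nlinarith
      have hq2 : 2 ≤ res.length / (j + 1) := le_trans hc2 hcq
      rw [if_pos ((hmem c).mpr (by omega)), if_pos ⟨⟨c, hc⟩, h2⟩]
    · have hc2 : ¬ 2 ≤ c := by intro hge; apply h2; nlinarith
      have hnotmem : ¬ c ∈ List.range' 2 (res.length / (j + 1) - 1) := by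
        intro hmem'; exact hc2 ((hmem c).mp hmem').1
      rw [if_neg hnotmem, if_neg (by rintro ⟨-, x⟩; exact h2 x)]
  · have hptw : ∀ i ∈ List.range' 2 (res.length / (j + 1) - 1),
        (if (j + 1) * i - 1 = k then v else (0:Int)) = 0 := by
      intro i hi
      have h2i : 2 ≤ i := ((hmem i).mp hi).1
      have hprod : 1 ≤ (j + 1) * i := Nat.one_le_iff_ne_zero.mpr (by positivity)
      rw [if_neg]
      intro he
      exact hdvd ⟨i, by omega⟩
    rw [List.map_congr_left hptw, if_neg (by rintro ⟨x, -⟩; exact hdvd x)]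
    simp

-- the multiset of targets pushLoop bumps, as a pure list
def divList (m : Nat) : Nat → List Nat
  | d =>
    if h : d * d ≤ m then
      (if m % d = 0 then
        (if 2 * d ≤ m then [d] else []) ++ (if m / d ≠ d ∧ 2 * (m / d) ≤ m then [m / d] else [])
      else []) ++ divList m (d + 1)
    else []
  termination_by d => m + 1 - d
  decreasing_by
    have hd : d ≤ m := by
      rcases Nat.eq_zero_or_pos d with h0 | h0
      · omega
      · calc d = d * 1 := (Nat.mul_one d).symm
          _ ≤ d * d := Nat.mul_le_mul_left d h0
          _ ≤ m := h
    omega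

def bump (ts : List Nat) (par : List Int) : List Int :=
  ts.foldl (fun p t => p.set (t - 1) (p.getD (t - 1) 0 + 1)) par

theorem bump_append (a b : List Nat) (p : List Int) : bump (a ++ b) p = bump b (bump a p) := by
  simp [bump]

-- the per-d emission of divList, as a list of targets
def emitDiv (m d : Nat) : List Nat :=
  if m % d = 0 then
    (if 2 * d ≤ m then [d] else []) ++ (if m / d ≠ d ∧ 2 * (m / d) ≤ m then [m / d] else [])
  else []

theorem foldl_pushStep_eq_bump (m : Nat) (l : List Nat) (par : List Int) :
    l.foldl (pushStep m) par = bump (l.flatMap (emitDiv m)) par := by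
  induction l generalizing par with
  | nil => rfl
  | cons d l ih =>
    rw [List.foldl_cons, List.flatMap_cons, bump_append, ih]
    congr 1
    unfold pushStep emitDiv bump
    split_ifs <;> simp

theorem divList_eq_flat (m : Nat) : ∀ d, divList m d = (List.range' d (Nat.sqrt m + 1 - d)).flatMap (emitDiv m) := by
  intro d
  fun_induction divList m d with
  | case1 x d h ih =>
    have hds : d ≤ Nat.sqrt m := Nat.le_sqrt.mpr h
    have hn : Nat.sqrt m + 1 - d = (Nat.sqrt m + 1 - (d + 1)) + 1 := by omega
    rw [hn, List.range'_succ, List.flatMap_cons, ih]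
    rfl
  | case2 x d h =>
    have hds : Nat.sqrt m < d := by
      by_contra hc
      exact h (Nat.le_sqrt.mp (by omega))
    have hn : Nat.sqrt m + 1 - d = 0 := by omega
    rw [hn]
    rfl

theorem pushFor_eq_bump (m : Nat) (par : List Int) : pushFor m par = bump (divList m 1) par := by
  rw [pushFor, foldl_pushStep_eq_bump, divList_eq_flat m 1, Nat.add_sub_cancel]

theorem length_bump (ts : List Nat) (par : List Int) : (bump ts par).length = par.length := by
  unfold bump
  induction ts generalizing par with
  | nil => rfl
  | cons t ts ih => simp only [List.foldl_cons]; rw [ih]; simp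

theorem length_pushFor (m : Nat) (par : List Int) : (pushFor m par).length = par.length := by
  rw [pushFor_eq_bump, length_bump]

theorem bump_getD (ts : List Nat) (par : List Int) (j : Nat) (hj : j < par.length)
    (hts : ∀ t ∈ ts, 1 ≤ t ∧ t ≤ par.length) :
    (bump ts par).getD j 0 = par.getD j 0 + (ts.count (j + 1) : Int) := by
  unfold bump
  induction ts generalizing par with
  | nil => simp
  | cons t ts ih =>
    simp only [List.foldl_cons]
    have h1 := hts t (by simp)
    rw [ih _ (by simp; omega) (by intro x hx; have := hts x (by simp [hx]); simp; omega)]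
    rw [getD_set _ _ _ _ (by omega)]
    rcases eq_or_ne t (j + 1) with rfl | h
    · simp [List.count_cons]; ring
    · have hne : j ≠ t - 1 := by omega
      simp [hne, List.count_cons, h]

theorem claimA_lem (m t d : Nat) (h : d * d ≤ m) :
    (if t ∣ m ∧ 2 * t ≤ m ∧ d ≤ t ∧ t * t ≤ m then (1:Int) else 0)
      = (if t ∣ m ∧ 2 * t ≤ m ∧ d + 1 ≤ t ∧ t * t ≤ m then 1 else 0)
      + (if m % d = 0 ∧ 2 * d ≤ m ∧ d = t then 1 else 0) := by
  by_cases hdt : d = t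
  · subst hdt
    have e1 : (d ∣ m ∧ 2 * d ≤ m ∧ d ≤ d ∧ d * d ≤ m) ↔ (d ∣ m ∧ 2 * d ≤ m) := by
      constructor
      · rintro ⟨a, b, -, -⟩; exact ⟨a, b⟩
      · rintro ⟨a, b⟩; exact ⟨a, b, le_rfl, h⟩
    have e2 : ¬ (d ∣ m ∧ 2 * d ≤ m ∧ d + 1 ≤ d ∧ d * d ≤ m) := by rintro ⟨-, -, x, -⟩; omega
    have e3 : (m % d = 0 ∧ 2 * d ≤ m ∧ d = d) ↔ (d ∣ m ∧ 2 * d ≤ m) := by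
      rw [← Nat.dvd_iff_mod_eq_zero]
      constructor
      · rintro ⟨a, b, -⟩; exact ⟨a, b⟩
      · rintro ⟨a, b⟩; exact ⟨a, b, rfl⟩
    rw [if_congr e1 rfl rfl, if_neg e2, if_congr e3 rfl rfl]
    by_cases hC : d ∣ m ∧ 2 * d ≤ m <;> simp [hC]
  · have hiff : (t ∣ m ∧ 2 * t ≤ m ∧ d ≤ t ∧ t * t ≤ m) ↔
        (t ∣ m ∧ 2 * t ≤ m ∧ d + 1 ≤ t ∧ t * t ≤ m) := by
      constructor <;> rintro ⟨a, b, c, e⟩ <;> refine ⟨a, b, ?_, e⟩ <;> omega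
    have hno : ¬ (m % d = 0 ∧ 2 * d ≤ m ∧ d = t) := by rintro ⟨-, -, rfl⟩; exact hdt rfl
    rw [if_congr hiff rfl rfl, if_neg hno]
    ring

theorem claimB_lem (m t d : Nat) (ht : 1 ≤ t) (h : d * d ≤ m) :
    (if t ∣ m ∧ 2 * t ≤ m ∧ t ≠ m / t ∧ d ≤ m / t ∧ (m / t) * (m / t) ≤ m then (1:Int) else 0)
      = (if t ∣ m ∧ 2 * t ≤ m ∧ t ≠ m / t ∧ d + 1 ≤ m / t ∧ (m / t) * (m / t) ≤ m then 1 else 0)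
      + (if m % d = 0 ∧ m / d ≠ d ∧ 2 * (m / d) ≤ m ∧ m / d = t then 1 else 0) := by
  by_cases hC : t ∣ m ∧ 2 * t ≤ m
  · obtain ⟨htm, h2t⟩ := hC
    have hm0 : m ≠ 0 := by omega
    have hmtt : m / (m / t) = t := Nat.div_div_self htm hm0
    by_cases hq : d = m / t
    · subst hq
      have hmodd : m % (m / t) = 0 := Nat.dvd_iff_mod_eq_zero.mp (Nat.div_dvd_of_dvd htm)
      have e1 : (t ∣ m ∧ 2 * t ≤ m ∧ t ≠ m / t ∧ m / t ≤ m / t ∧ (m / t) * (m / t) ≤ m) ↔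
          ¬ t = m / t := by
        constructor
        · rintro ⟨-, -, x, -, -⟩; exact x
        · intro x; exact ⟨htm, h2t, x, le_rfl, h⟩
      have e2 : ¬ (t ∣ m ∧ 2 * t ≤ m ∧ t ≠ m / t ∧ m / t + 1 ≤ m / t ∧ (m / t) * (m / t) ≤ m) := by
        rintro ⟨-, -, -, x, -⟩; omega
      have e3 : (m % (m / t) = 0 ∧ m / (m / t) ≠ m / t ∧ 2 * (m / (m / t)) ≤ m ∧ m / (m / t) = t) ↔
          ¬ t = m / t := by
        rw [hmtt]
        constructor
        · rintro ⟨-, x, -, -⟩; exact x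
        · intro x; exact ⟨hmodd, x, h2t, rfl⟩
      rw [if_congr e1 rfl rfl, if_neg e2, if_congr e3 rfl rfl]
      rw [zero_add]
    · have hiff : (t ∣ m ∧ 2 * t ≤ m ∧ t ≠ m / t ∧ d ≤ m / t ∧ (m / t) * (m / t) ≤ m) ↔
          (t ∣ m ∧ 2 * t ≤ m ∧ t ≠ m / t ∧ d + 1 ≤ m / t ∧ (m / t) * (m / t) ≤ m) := by
        constructor <;> rintro ⟨a, b, c, e, f⟩ <;> refine ⟨a, b, c, ?_, f⟩ <;> omega
      have hno : ¬ (m % d = 0 ∧ m / d ≠ d ∧ 2 * (m / d) ≤ m ∧ m / d = t) := by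
        rintro ⟨e1, e2, e3, e4⟩
        apply hq
        have hddvd : d ∣ m := Nat.dvd_iff_mod_eq_zero.mpr e1
        have hback : m / (m / d) = d := Nat.div_div_self hddvd hm0
        rw [← e4, hback]
      rw [if_congr hiff rfl rfl, if_neg hno]
      ring
  · have c1 : ¬ (t ∣ m ∧ 2 * t ≤ m ∧ t ≠ m / t ∧ d ≤ m / t ∧ (m / t) * (m / t) ≤ m) := by
      rintro ⟨a, b, -⟩; exact hC ⟨a, b⟩
    have c2 : ¬ (t ∣ m ∧ 2 * t ≤ m ∧ t ≠ m / t ∧ d + 1 ≤ m / t ∧ (m / t) * (m / t) ≤ m) := by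
      rintro ⟨a, b, -⟩; exact hC ⟨a, b⟩
    have c3 : ¬ (m % d = 0 ∧ m / d ≠ d ∧ 2 * (m / d) ≤ m ∧ m / d = t) := by
      rintro ⟨e1, e2, e3, e4⟩
      have hddvd : d ∣ m := Nat.dvd_iff_mod_eq_zero.mpr e1
      exact hC ⟨e4 ▸ Nat.div_dvd_of_dvd hddvd, e4 ▸ e3⟩
    rw [if_neg c1, if_neg c2, if_neg c3]
    ring

theorem emit_count (m t d : Nat) :
    ((List.count t (if m % d = 0 then
        (if 2 * d ≤ m then [d] else []) ++ (if m / d ≠ d ∧ 2 * (m / d) ≤ m then [m / d] else [])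
      else []) : Nat) : Int)
    = (if m % d = 0 ∧ 2 * d ≤ m ∧ d = t then 1 else 0)
    + (if m % d = 0 ∧ m / d ≠ d ∧ 2 * (m / d) ≤ m ∧ m / d = t then 1 else 0) := by
  by_cases h1 : m % d = 0
  · rw [if_pos h1, List.count_append]
    push_cast
    have ea : ((List.count t (if 2 * d ≤ m then [d] else []) : Nat) : Int)
        = if m % d = 0 ∧ 2 * d ≤ m ∧ d = t then 1 else 0 := by
      by_cases h2 : 2 * d ≤ m
      · rw [if_pos h2]
        by_cases h3 : d = t
        · rw [if_pos ⟨h1, h2, h3⟩, h3]; simp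
        · rw [if_neg (by tauto)]; simp [h3]
      · rw [if_neg h2, if_neg (by tauto)]
        simp
    have eb : ((List.count t (if m / d ≠ d ∧ 2 * (m / d) ≤ m then [m / d] else []) : Nat) : Int)
        = if m % d = 0 ∧ m / d ≠ d ∧ 2 * (m / d) ≤ m ∧ m / d = t then 1 else 0 := by
      by_cases h2 : m / d ≠ d ∧ 2 * (m / d) ≤ m
      · rw [if_pos h2]
        by_cases h3 : m / d = t
        · rw [if_pos ⟨h1, h2.1, h2.2, h3⟩, h3]; simp
        · rw [if_neg (by tauto)]; simp [h3]
      · rw [if_neg h2, if_neg (by tauto)]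
        simp
    rw [ea, eb]
  · rw [if_neg h1, if_neg (by tauto), if_neg (by tauto)]
    simp

theorem divList_count_aux (m t : Nat) (ht : 1 ≤ t) (d : Nat) :
    ((divList m d).count t : Int)
      = (if t ∣ m ∧ 2 * t ≤ m ∧ d ≤ t ∧ t * t ≤ m then 1 else 0)
      + (if t ∣ m ∧ 2 * t ≤ m ∧ t ≠ m / t ∧ d ≤ m / t ∧ (m / t) * (m / t) ≤ m then 1 else 0) := by
  fun_induction divList m d with
  | case1 x d h ih =>
    rw [List.count_append]
    push_cast
    rw [ih, emit_count, claimA_lem m t d h, claimB_lem m t d ht h]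
    ring
  | case2 x d h =>
    rw [List.count_nil]
    have h1 : ¬ (t ∣ m ∧ 2 * t ≤ m ∧ d ≤ t ∧ t * t ≤ m) := by
      rintro ⟨-, -, hdt, htt⟩
      exact h (le_trans (Nat.mul_le_mul hdt hdt) htt)
    have h2 : ¬ (t ∣ m ∧ 2 * t ≤ m ∧ t ≠ m / t ∧ d ≤ m / t ∧ (m / t) * (m / t) ≤ m) := by
      rintro ⟨-, -, -, hdt, htt⟩
      exact h (le_trans (Nat.mul_le_mul hdt hdt) htt)
    rw [if_neg h1, if_neg h2]
    simp

theorem divList_count (m t : Nat) (ht : 1 ≤ t) :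
    ((divList m 1).count t : Int) = (if t ∣ m ∧ 2 * t ≤ m then 1 else 0) := by
  rw [divList_count_aux m t ht 1]
  by_cases hC : t ∣ m ∧ 2 * t ≤ m
  · obtain ⟨⟨c, hc⟩, h2t⟩ := hC
    subst hc
    have ht0 : 0 < t := ht
    have hdiv : t * c / t = c := Nat.mul_div_cancel_left c ht0
    rw [hdiv]
    have hc1 : 1 ≤ c := by nlinarith
    have hd1 : t ∣ t * c := dvd_mul_right t c
    rcases lt_trichotomy t c with hlt | heq | hgt
    · have A1 : t * t ≤ t * c := by nlinarith
      have A2 : ¬ (c * c ≤ t * c) := by intro hcc; nlinarith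
      simp [hd1, h2t, ht, A1, A2, hc1]
    · subst heq
      simp [hd1, h2t, ht]
    · have A1 : ¬ (t * t ≤ t * c) := by intro htt; nlinarith
      have A2 : c * c ≤ t * c := by nlinarith
      have A3 : t ≠ c := by omega
      simp [hd1, h2t, ht, A1, A2, A3, hc1]
  · have c1 : ¬ (t ∣ m ∧ 2 * t ≤ m ∧ 1 ≤ t ∧ t * t ≤ m) := by rintro ⟨a, b, -⟩; exact hC ⟨a, b⟩
    have c2 : ¬ (t ∣ m ∧ 2 * t ≤ m ∧ t ≠ m / t ∧ 1 ≤ m / t ∧ (m / t) * (m / t) ≤ m) := by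
      rintro ⟨a, b, -⟩; exact hC ⟨a, b⟩
    rw [if_neg c1, if_neg c2, if_neg hC]
    simp

theorem divList_mem (m : Nat) (d : Nat) :
    1 ≤ d → ∀ t ∈ divList m d, 1 ≤ t ∧ 2 * t ≤ m := by
  fun_induction divList m d with
  | case1 x d h ih =>
    intro hd t htl
    rcases List.mem_append.mp htl with he | hr
    · have hdm : d ≤ m := by
        calc d = d * 1 := (Nat.mul_one d).symm
          _ ≤ d * d := Nat.mul_le_mul_left d hd
          _ ≤ m := h
      by_cases a1 : m % d = 0
      · rw [if_pos a1, List.mem_append] at he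
        rcases he with he | he
        · by_cases a2 : 2 * d ≤ m
          · rw [if_pos a2, List.mem_singleton] at he; subst he; exact ⟨hd, a2⟩
          · rw [if_neg a2] at he; simp at he
        · by_cases a3 : m / d ≠ d ∧ 2 * (m / d) ≤ m
          · rw [if_pos a3, List.mem_singleton] at he; subst he
            exact ⟨Nat.div_pos hdm (by omega), a3.2⟩
          · rw [if_neg a3] at he; simp at he
      · rw [if_neg a1] at he; simp at he
    · exact ih (by omega) t hr
  | case2 x d h =>
    intro _ t htl
    simp at htl

theorem pushFor_getD (m : Nat) (par : List Int) (j : Nat)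
    (hmlen : m ≤ par.length) (hj : j < par.length) :
    (pushFor m par).getD j 0
      = par.getD j 0 + (if (j + 1) ∣ m ∧ 2 * (j + 1) ≤ m then 1 else 0) := by
  rw [pushFor_eq_bump]
  rw [bump_getD _ _ _ hj (by
    intro t htl
    have := divList_mem m 1 le_rfl t htl
    omega)]
  rw [divList_count m (j + 1) (by omega)]

theorem loop_eq (arr : List Int) :
    ∀ (k : Nat) (res par r2 : List Int),
      res.length = arr.length → par.length = arr.length → k ≤ arr.length →
      (∀ j, j < k → res.getD j 0 = 0) →
      (∀ j, j < k → par.getD j 0 = sumMult res j) →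
      calcA_loop arr (arr.length : Int) k res r2 = calcB_loop arr arr.length k res par r2 := by
  intro k
  induction k with
  | zero => intro res par r2 _ _ _ _ _; rfl
  | succ k ih =>
    intro res par r2 hres hpar hk hres0 hpar0
    have hkN : k < arr.length := by omega
    have hkr : k < res.length := by omega
    rw [calcA_loop, calcB_loop]
    have hfd : PySem.Int.floordiv ((arr.length : Nat) : Int) ((k : Int) + 1)
        = ((arr.length / (k + 1) : Nat) : Int) := by
      rw [show ((k : Int) + 1) = ((k + 1 : Nat) : Int) by push_cast; ring]
      exact PySem.Int.floordiv_natCast _ _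
    have hga : PySem.List.pyGetD arr ((k : Nat) : Int) 0 = arr.getD k 0 := by simp
    have hsetr : ∀ v : Int, PySem.List.pySetD res ((k : Nat) : Int) v = res.set k v := by
      intro v; simp
    have hmod2 : ∀ x : Int, PySem.Int.mod x 2 = x % 2 := fun x =>
      PySem.Int.mod_eq_emod_of_pos (by norm_num)
    have hpk : par.getD k 0 = sumMult res k := hpar0 k (by omega)
    have hv1 : calculate2 ((arr.length / (k + 1) : Nat) : Int) ((k : Nat) : Int) res
        = sumMult res k := calculate2_eq_sumMult res k _ (by rw [hres])
    have hset0 : res.set k 0 = res := set_self_of_getD_zero res k hkr (hres0 k (by omega))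
    have hcast1 : ((k : Int) + 1) = ((k + 1 : Nat) : Int) := by push_cast; ring
    have ihset1 : calcA_loop arr (arr.length : Int) k (res.set k 1) (r2 ++ [((k + 1 : Nat) : Int)])
        = calcB_loop arr arr.length k (res.set k 1) (pushFor (k + 1) par)
            (r2 ++ [((k + 1 : Nat) : Int)]) := by
      apply ih
      · simp [hres]
      · rw [length_pushFor, hpar]
      · omega
      · intro j hj
        rw [getD_set _ _ _ _ hkr, if_neg (by omega)]
        exact hres0 j (by omega)
      · intro j hj
        rw [pushFor_getD (k + 1) par j (by omega) (by omega)]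
        rw [sumMult_set res j k 1 hkr (hres0 k (by omega)) hj]
        rw [hpar0 j (by omega)]
    have ihsame : calcA_loop arr (arr.length : Int) k res r2
        = calcB_loop arr arr.length k res par r2 := by
      apply ih _ _ _ hres hpar (by omega)
      · intro j hj; exact hres0 j (by omega)
      · intro j hj; exact hpar0 j (by omega)
    rw [hfd, hga]
    simp only [hmod2]
    rw [hv1]
    by_cases hbr : arr.length / (k + 1) > 1
    · have hbrI : ((arr.length / (k + 1) : Nat) : Int) > 1 := by exact_mod_cast hbr
      rw [if_pos hbrI]
      by_cases ha : arr.getD k 0 % 2 = 0 <;> by_cases hs : sumMult res k % 2 = 0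
      · -- even / even: A passes, B writes r = 0
        have hrB : (if arr.length / (k + 1) > 1 then
              (arr.getD k 0 + par.getD k 0) % 2
            else if arr.getD k 0 = 0 then 0 else 1) = 0 := by
          rw [if_pos hbr, hpk]; omega
        rw [hrB, if_pos ha, if_pos hs, if_neg (by norm_num), hset0]
        exact ihsame
      · -- even / odd: both write 1 and append k+1
        have hrB : (if arr.length / (k + 1) > 1 then
              (arr.getD k 0 + par.getD k 0) % 2
            else if arr.getD k 0 = 0 then 0 else 1) = 1 := by
          rw [if_pos hbr, hpk]; omega
        rw [hrB, if_pos ha, if_neg hs, if_pos rfl, hsetr, hcast1]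
        exact ihset1
      · -- odd / even: both write 1 and append k+1
        have hrB : (if arr.length / (k + 1) > 1 then
              (arr.getD k 0 + par.getD k 0) % 2
            else if arr.getD k 0 = 0 then 0 else 1) = 1 := by
          rw [if_pos hbr, hpk]; omega
        rw [hrB, if_neg ha, if_pos hs, if_pos rfl, hsetr, hcast1]
        exact ihset1
      · -- odd / odd: A passes, B writes r = 0
        have hrB : (if arr.length / (k + 1) > 1 then
              (arr.getD k 0 + par.getD k 0) % 2
            else if arr.getD k 0 = 0 then 0 else 1) = 0 := by
          rw [if_pos hbr, hpk]; omega
        rw [hrB, if_neg ha, if_neg hs, if_neg (by norm_num), hset0]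
        exact ihsame
    · have hbrI : ¬ (((arr.length / (k + 1) : Nat) : Int) > 1) := by exact_mod_cast hbr
      rw [if_neg hbrI]
      by_cases ha0 : arr.getD k 0 = 0
      · -- value 0: both write 0 (a no-op write)
        have hrB : (if arr.length / (k + 1) > 1 then
              (arr.getD k 0 + par.getD k 0) % 2
            else if arr.getD k 0 = 0 then 0 else 1) = 0 := by
          rw [if_neg hbr, if_pos ha0]
        rw [hrB, if_pos ha0, if_neg (by norm_num), hsetr, hset0]
        exact ihsame
      · -- nonzero value: both write 1 and append k+1
        have hrB : (if arr.length / (k + 1) > 1 then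
              (arr.getD k 0 + par.getD k 0) % 2
            else if arr.getD k 0 = 0 then 0 else 1) = 1 := by
          rw [if_neg hbr, if_neg ha0]
        rw [hrB, if_neg ha0, if_pos rfl, hsetr, hcast1]
        exact ihset1

-- ===== VERDICT (by name: the statement is the Claim_ definition above) =====
theorem calculate_spec : Claim_equal_calculate := by
  intro arr _
  unfold Spec_calculate calculate calculate_alt
  exact loop_eq arr arr.length (List.replicate arr.length 0) (List.replicate arr.length 0) []
    (by simp) (by simp) le_rfl (by intro j hj; simp) (by intro j hj; simp [sumMult])
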